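-- pv_equiv track=rewrite | github.com/agh-bit-academy/SummerProject2022 | WDI/Zestaw_3/Zadanie_15/prog.py | f
-- ===== SOURCE A (Python) =====
-- def isPrime(n):
--     if n == 2:
--         return True
--     if n < 2 or n % 2 == 0:
--         return False
--     i = 3
--     while i**2 <= n:
--         if n % i == 0:
--             return False
--         i += 2
--     return True
--
-- def f(arr):
--     ramainingPrime = False
--     a = 1
--     b = 1
--
--     if isPrime(arr[0]):
--         ramainingPrime = True
--
--     while b < len(arr):
--         if isPrime(arr[b]):
--             return False
--         if not ramainingPrime:
--             for i in range(a + 1, b):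
--                 if isPrime(arr[i]):
--                     ramainingPrime = True
--                     break
--         a, b = b, a + b
--
--     if not ramainingPrime:
--         for i in range(a + 1, len(arr)):
--             if isPrime(arr[i]):
--                 ramainingPrime = True
--                 break
--
--     return ramainingPrime
-- ===== SOURCE B (Python) =====
-- def isPrime(n):
--     if n == 2:
--         return True
--     if n < 2 or n % 2 == 0:
--         return False
--     i = 3
--     while i**2 <= n:
--         if n % i == 0:
--             return False
--         i += 2
--     return True
--
-- def f(arr):
--     fib = set()
--     a, b = 1, 1
--     while b < len(arr):
--         fib.add(b)
--         a, b = b, a + b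
--     remaining = False
--     i = 0
--     for x in arr:
--         if i in fib:
--             if isPrime(x):
--                 return False
--         elif isPrime(x):
--             remaining = True
--         i += 1
--     return remaining
-- ===== Notes on version B (the rewrite author's own statement) =====
-- stated objective: simpler
-- what changed: replaces A's interleaved Fibonacci two-pointer walk (checking each Fibonacci index and scanning the gap ranges between successive Fibonacci pairs) by precomputing the set of Fibonacci indices once and then classifying every element in one uniform left-to-right pass
import Mathlib
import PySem

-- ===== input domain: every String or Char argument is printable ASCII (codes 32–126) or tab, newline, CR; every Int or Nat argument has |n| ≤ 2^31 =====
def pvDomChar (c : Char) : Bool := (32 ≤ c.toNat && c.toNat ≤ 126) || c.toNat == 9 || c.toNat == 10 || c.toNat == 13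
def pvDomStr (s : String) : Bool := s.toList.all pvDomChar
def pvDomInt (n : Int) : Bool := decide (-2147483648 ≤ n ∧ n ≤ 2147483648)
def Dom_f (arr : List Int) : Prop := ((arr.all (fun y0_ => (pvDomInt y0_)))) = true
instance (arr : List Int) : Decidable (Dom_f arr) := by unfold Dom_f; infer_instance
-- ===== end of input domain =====

-- B replaces A's interleaved Fibonacci two-pointer walk by a precomputed set of
-- Fibonacci indices and one uniform classifying pass (simpler, not faster:
-- B primality-tests every element, while A stops scanning gaps after a hit).

-- ===== PORT A =====
-- helper isPrime is shared verbatim by both Pythons.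
-- while i**2 <= n: fuel-bounded structural recursion; fuel n.toNat bounds the
-- iteration count (i grows by 2 and i*i ≤ n), so the port is exact.
def isPrimeLoop (n : Int) : Nat → Nat → Bool
  | _, 0 => true
  | i, fuel + 1 =>
    if (i : Int) * (i : Int) ≤ n then
      (if PySem.Int.mod n (i : Int) == 0 then false else isPrimeLoop n (i + 2) fuel)
    else true

def isPrime (n : Int) : Bool :=
  if n == 2 then true
  else if decide (n < 2) || (PySem.Int.mod n 2 == 0) then false
  else isPrimeLoop n 3 n.toNat

-- 'for i in range(lo, hi): if isPrime(arr[i]): flag = True; break' folded to .any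
-- (the break only sets the flag). Indices produced are always in range, so the
-- total pyGetD is exact here.
def gapScan (arr : List Int) (lo hi : Int) : Bool :=
  (PySem.List.pyRange lo hi 1).any (fun i => isPrime (PySem.List.pyGetD arr i 0))

-- A's while loop; b < len(arr) guard, simultaneous a, b = b, a+b. Fuel-bounded:
-- b strictly increases each iteration, so fuel len+1 is never exhausted (exact).
def fLoop (arr : List Int) (rP : Bool) (a b : Nat) : Nat → Bool
  | 0 => if rP then true else gapScan arr ((a : Int) + 1) (arr.length : Int)
  | fuel + 1 =>
    if b < arr.length then
      if isPrime (PySem.List.pyGetD arr (b : Int) 0) then false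
      else fLoop arr (if rP then true else gapScan arr ((a : Int) + 1) (b : Int)) b (a + b) fuel
    else if rP then true else gapScan arr ((a : Int) + 1) (arr.length : Int)

def f (arr : List Int) : Bool :=
  -- the unconditional first-element read: IndexError on the empty list, excluded by Pre_f
  fLoop arr (isPrime (PySem.List.pyGetD arr 0 0)) 1 1 (arr.length + 1)

-- ===== PORT B =====
-- build the set of Fibonacci indices < len(arr); fuel len+1 suffices (b strictly
-- increases), exact.
def fibIdxLoop (L : Nat) (a b : Nat) (s : PySem.Set Nat) : Nat → PySem.Set Nat
  | 0 => s
  | fuel + 1 =>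
    if b < L then fibIdxLoop L b (a + b) (PySem.Set.add s b) fuel else s

-- the single classifying pass with an index counter
def fAltLoop (fib : PySem.Set Nat) (i : Nat) (remaining : Bool) : List Int → Bool
  | [] => remaining
  | x :: rest =>
    if PySem.Set.contains fib i then
      (if isPrime x then false else fAltLoop fib (i + 1) remaining rest)
    else if isPrime x then fAltLoop fib (i + 1) true rest
    else fAltLoop fib (i + 1) remaining rest

def f_alt (arr : List Int) : Bool :=
  fAltLoop (fibIdxLoop arr.length 1 1 PySem.Set.empty (arr.length + 1)) 0 false arr

-- ===== PRECONDITION & SPEC =====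
-- A reads the first element unconditionally, so it raises IndexError on the empty list.
def Pre_f (arr : List Int) : Prop := arr ≠ []
instance (arr : List Int) : Decidable (Pre_f arr) := by unfold Pre_f; infer_instance
def pvWitness_f : List Int := [9, 7, 4]

def Spec_f (arr : List Int) (out : Bool) : Prop := out = f_alt arr
instance (arr : List Int) (out : Bool) : Decidable (Spec_f arr out) := by unfold Spec_f; infer_instance

-- ===== CLAIM (what is proved, stated in full; the proofs are below) =====
def Claim_equal_f : Prop := ∀ (arr : List Int), Dom_f arr → Pre_f arr → Spec_f arr (f arr)

-- ===== LEMMAS AND PROOFS =====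

-- primality of the element at index j (both sides reduce to this predicate)
def prAt (arr : List Int) (j : Nat) : Bool := isPrime (arr.getD j 0)

-- the Fibonacci index values A's loop visits from state (a, b)
def fibFrom (L a b : Nat) : Nat → List Nat
  | 0 => []
  | fuel + 1 => if b < L then b :: fibFrom L b (a + b) fuel else []

-- the gap indices A scans from state (a, b), including the final tail scan
def gapsFrom (L a b : Nat) : Nat → List Nat
  | 0 => List.range' (a + 1) (L - (a + 1))
  | fuel + 1 =>
    if b < L then List.range' (a + 1) (b - (a + 1)) ++ gapsFrom L b (a + b) fuel
    else List.range' (a + 1) (L - (a + 1))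

lemma gapScan_eq (arr : List Int) (lo hi : Nat) :
    gapScan arr ((lo : Int) + 1) (hi : Int) = (List.range' (lo + 1) (hi - (lo + 1))).any (prAt arr) := by
  have hcast : ((hi : Int) - ((lo : Int) + 1)).toNat = hi - (lo + 1) := by omega
  simp only [gapScan, PySem.List.pyRange_one, hcast, List.range'_eq_map_range, List.any_map]
  congr 1
  funext k
  simp only [Function.comp_apply]
  have h1 : (lo : Int) + 1 + (k : Int) = ((lo + 1 + k : Nat) : Int) := by push_cast; ring
  rw [h1, PySem.List.pyGetD_natCast]
  rfl

lemma fLoop_eq (arr : List Int) :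
    ∀ (fuel : Nat) (a b : Nat) (rP : Bool),
      fLoop arr rP a b fuel =
        if (fibFrom arr.length a b fuel).any (prAt arr) then false
        else rP || (gapsFrom arr.length a b fuel).any (prAt arr) := by
  intro fuel
  induction fuel with
  | zero =>
    intro a b rP
    simp only [fLoop, fibFrom, gapsFrom, List.any_nil, Bool.false_eq_true, gapScan_eq]
    cases rP <;> simp
  | succ n ih =>
    intro a b rP
    simp only [fLoop, fibFrom, gapsFrom]
    by_cases hb : b < arr.length
    · simp only [hb, if_true]
      have hgetb : isPrime (PySem.List.pyGetD arr (b : Int) 0) = prAt arr b := by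
        rw [PySem.List.pyGetD_natCast]; rfl
      rw [hgetb]
      cases hp : prAt arr b with
      | true => simp [hp]
      | false =>
        simp only [hp, Bool.false_eq_true, if_false, ih, gapScan_eq, List.any_cons,
          List.any_append, Bool.false_or]
        cases rP <;> cases h1 : (List.range' (a + 1) (b - (a + 1))).any (prAt arr) <;>
          cases h2 : (fibFrom arr.length b (a + b) n).any (prAt arr) <;>
          cases h3 : (gapsFrom arr.length b (a + b) n).any (prAt arr) <;> simp [h1, h2, h3]
    · simp only [hb, if_false, gapScan_eq, List.any_nil]
      cases rP <;> simp

lemma fibFrom_lt (L : Nat) : ∀ (fuel a b k : Nat), k ∈ fibFrom L a b fuel → k < L := by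
  intro fuel
  induction fuel with
  | zero => intro a b k h; simp [fibFrom] at h
  | succ n ih =>
    intro a b k h
    by_cases hb : b < L
    · simp only [fibFrom, hb, if_true, List.mem_cons] at h
      rcases h with h | h
      · omega
      · exact ih b (a + b) k h
    · simp [fibFrom, hb] at h

lemma fibFrom_ge (L : Nat) : ∀ (fuel a b k : Nat), k ∈ fibFrom L a b fuel → b ≤ k := by
  intro fuel
  induction fuel with
  | zero => intro a b k h; simp [fibFrom] at h
  | succ n ih =>
    intro a b k h
    by_cases hb : b < L
    · simp only [fibFrom, hb, if_true, List.mem_cons] at h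
      rcases h with h | h
      · omega
      · have := ih b (a + b) k h; omega
    · simp [fibFrom, hb] at h

lemma gaps_iff (L : Nat) : ∀ (fuel a b : Nat), 1 ≤ a → a ≤ b → ∀ (j : Nat),
    (j ∈ gapsFrom L a b fuel ↔ a < j ∧ j < L ∧ j ∉ fibFrom L a b fuel) := by
  intro fuel
  induction fuel with
  | zero =>
    intro a b _ _ j
    simp only [gapsFrom, fibFrom, List.mem_range', List.not_mem_nil]
    constructor
    · rintro ⟨i, hi, rfl⟩
      refine ⟨by omega, by omega, by trivial⟩
    · rintro ⟨h1, h2, -⟩; exact ⟨j - (a + 1), by omega, by omega⟩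
  | succ n ih =>
    intro a b ha hab j
    by_cases hb : b < L
    · simp only [gapsFrom, fibFrom, hb, if_true, List.mem_append, List.mem_range',
        List.mem_cons, not_or]
      have hrec := ih b (a + b) (by omega) (by omega) j
      constructor
      · rintro (⟨i, hi, rfl⟩ | hg)
        · refine ⟨by omega, by omega, by omega, ?_⟩
          intro hmem
          have := fibFrom_ge L n b (a + b) _ hmem
          omega
        · have := hrec.mp hg
          exact ⟨by omega, this.2.1, by omega, this.2.2⟩
      · rintro ⟨h1, h2, hne, hfib⟩
        by_cases hjb : j < b
        · exact Or.inl ⟨j - (a + 1), by omega, by omega⟩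
        · exact Or.inr (hrec.mpr ⟨by omega, h2, hfib⟩)
    · simp only [gapsFrom, fibFrom, hb, if_false, List.mem_range', List.not_mem_nil]
      constructor
      · rintro ⟨i, hi, rfl⟩
        refine ⟨by omega, by omega, by trivial⟩
      · rintro ⟨h1, h2, -⟩; exact ⟨j - (a + 1), by omega, by omega⟩

lemma fibIdxLoop_mem (L : Nat) : ∀ (fuel a b : Nat) (s : PySem.Set Nat) (k : Nat),
    (k ∈ fibIdxLoop L a b s fuel ↔ k ∈ s ∨ k ∈ fibFrom L a b fuel) := by
  intro fuel
  induction fuel with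
  | zero => intro a b s k; simp [fibIdxLoop, fibFrom]
  | succ n ih =>
    intro a b s k
    by_cases hb : b < L
    · simp only [fibIdxLoop, fibFrom, hb, if_true, List.mem_cons]
      rw [ih, PySem.Set.mem_add]
      tauto
    · simp [fibIdxLoop, fibFrom, hb]

lemma fAltLoop_eq (fib : PySem.Set Nat) :
    ∀ (xs : List Int) (i : Nat) (r : Bool),
      fAltLoop fib i r xs =
        if (List.range xs.length).any (fun k => PySem.Set.contains fib (i + k) && prAt xs k) then false
        else r || (List.range xs.length).any (fun k => !PySem.Set.contains fib (i + k) && prAt xs k) := by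
  intro xs
  induction xs with
  | nil => intro i r; simp [fAltLoop]
  | cons x rest ih =>
    intro i r
    have hrange : List.range (rest.length + 1) = 0 :: (List.range rest.length).map (· + 1) := by
      simpa using List.range_succ_eq_map (n := rest.length)
    have hshift : ∀ (p : Nat → Bool),
        ((List.range rest.length).map (· + 1)).any p = (List.range rest.length).any (fun k => p (k + 1)) := by
      intro p; rw [List.any_map]; rfl
    have h0 : prAt (x :: rest) 0 = isPrime x := by simp [prAt]
    have hs : ∀ (c : Nat → Bool),
        (List.range rest.length).any (fun k => c (i + (k + 1)) && prAt (x :: rest) (k + 1)) =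
        (List.range rest.length).any (fun k => c (i + 1 + k) && prAt rest k) := by
      intro c
      congr 1
      funext k
      have hik : i + (k + 1) = i + 1 + k := by omega
      simp [hik, prAt]
    simp only [fAltLoop, List.length_cons, hrange, List.any_cons, hshift, h0, Nat.add_zero]
    rw [hs (fun j => PySem.Set.contains fib j), hs (fun j => !PySem.Set.contains fib j),
        ih (i + 1) r, ih (i + 1) true]
    cases hc : PySem.Set.contains fib i <;> cases hp : isPrime x <;>
      cases hA : (List.range rest.length).any (fun k => PySem.Set.contains fib (i + 1 + k) && prAt rest k) <;>
      cases hN : (List.range rest.length).any (fun k => !PySem.Set.contains fib (i + 1 + k) && prAt rest k) <;>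
      simp [hc, hp, hA, hN]

-- Bool equality from the iff of the underlying propositions
lemma bool_eq_of_iff {x y : Bool} (h : x = true ↔ y = true) : x = y := by
  cases x <;> cases y <;> simp_all

-- ===== VERDICT (by name: the statement is the Claim_ definition above) =====
theorem f_spec : Claim_equal_f := by
  intro arr _ hpre
  unfold Spec_f f f_alt
  have hL1 : 1 ≤ arr.length := by
    cases arr with
    | nil => exact absurd rfl hpre
    | cons x xs => simp
  have hget0 : isPrime (PySem.List.pyGetD arr 0 0) = prAt arr 0 := by
    have : ((0 : Nat) : Int) = (0 : Int) := rfl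
    rw [← this, PySem.List.pyGetD_natCast]; rfl
  rw [fLoop_eq, fAltLoop_eq, hget0]
  have hcontains : ∀ k, PySem.Set.contains (fibIdxLoop arr.length 1 1 PySem.Set.empty (arr.length + 1)) k = true ↔
      k ∈ fibFrom arr.length 1 1 (arr.length + 1) := by
    intro k
    rw [PySem.Set.contains_iff, fibIdxLoop_mem]
    simp [PySem.Set.empty]
  have hnc : ∀ k, PySem.Set.contains (fibIdxLoop arr.length 1 1 PySem.Set.empty (arr.length + 1)) k = false ↔
      k ∉ fibFrom arr.length 1 1 (arr.length + 1) := by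
    intro k
    rw [← Bool.not_eq_true, hcontains k]
  -- the two "a Fibonacci-indexed element is prime" tests agree
  have hA : ((List.range arr.length).any (fun k =>
        PySem.Set.contains (fibIdxLoop arr.length 1 1 PySem.Set.empty (arr.length + 1)) (0 + k) && prAt arr k)) =
      (fibFrom arr.length 1 1 (arr.length + 1)).any (prAt arr) := by
    apply bool_eq_of_iff
    simp only [List.any_eq_true, List.mem_range, Bool.and_eq_true, Nat.zero_add]
    constructor
    · rintro ⟨k, -, hk, hp⟩
      exact ⟨k, (hcontains k).mp hk, hp⟩
    · rintro ⟨k, hk, hp⟩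
      exact ⟨k, fibFrom_lt arr.length (arr.length + 1) 1 1 k hk, (hcontains k).mpr hk, hp⟩
  -- the two "some other element is prime" tests agree
  have hB : (prAt arr 0 || (gapsFrom arr.length 1 1 (arr.length + 1)).any (prAt arr)) =
      ((List.range arr.length).any (fun k =>
        !PySem.Set.contains (fibIdxLoop arr.length 1 1 PySem.Set.empty (arr.length + 1)) (0 + k) && prAt arr k)) := by
    apply bool_eq_of_iff
    simp only [Bool.or_eq_true, List.any_eq_true, List.mem_range, Bool.and_eq_true,
      Bool.not_eq_eq_eq_not, Bool.not_true, Nat.zero_add]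
    constructor
    · rintro (h0 | ⟨k, hk, hp⟩)
      · refine ⟨0, by omega, (hnc 0).mpr ?_, h0⟩
        intro hmem
        have := fibFrom_ge arr.length (arr.length + 1) 1 1 0 hmem
        omega
      · have := (gaps_iff arr.length (arr.length + 1) 1 1 (by omega) (by omega) k).mp hk
        exact ⟨k, this.2.1, (hnc k).mpr this.2.2, hp⟩
    · rintro ⟨k, hkL, hk, hp⟩
      rcases Nat.lt_or_ge k 2 with hk2 | hk2
      · interval_cases k
        · exact Or.inl hp
        · -- k = 1: impossible, 1 < arr.length makes 1 a Fibonacci index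
          exfalso
          have hmem : (1 : Nat) ∈ fibFrom arr.length 1 1 (arr.length + 1) := by
            have h1L : 1 < arr.length := hkL
            simp [fibFrom, h1L]
          exact absurd hmem ((hnc 1).mp hk)
      · exact Or.inr ⟨k, (gaps_iff arr.length (arr.length + 1) 1 1 (by omega) (by omega) k).mpr
          ⟨by omega, hkL, (hnc k).mp hk⟩, hp⟩
  rw [hA, ← hB]
  cases hAB : (fibFrom arr.length 1 1 (arr.length + 1)).any (prAt arr) <;> simp
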